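-- pv_equiv track=rewrite | github.com/yesolee/Study_Algorithm | 프로그래머스/1/42862. 체육복/체육복.py | solution
-- ===== SOURCE A (Python) =====
-- def solution(n, lost, reserve):
--     # 중복 없으므로 set으로 변환
--     lost_set = set(lost)
--     reserve_set =set(reserve)
--
--     # 도난+여벌(자기꺼만 쓸 수 있음)
--     intersection = lost_set & reserve_set
--     lost_set -= intersection
--     reserve_set -= intersection
--
--     # 체육복 빌리기
--     answer = 0
--     for student in sorted(lost_set):
--         if student-1 in reserve_set:
--             reserve_set.remove(student-1)
--             answer += 1
--         elif student+1 in reserve_set: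
--             reserve_set.remove(student+1)
--             answer += 1
--         else:
--             continue # 못빌림
--
--     return n-len(lost_set)+answer
-- ===== SOURCE B (Python) =====
-- def solution(n, lost, reserve):
--     # two-pointer sweep over the sorted lost-only and reserve-only lists
--     L = sorted(set(lost) - set(reserve))
--     R = sorted(set(reserve) - set(lost))
--     i = j = matched = 0
--     while i < len(L) and j < len(R):
--         if R[j] < L[i] - 1:
--             j += 1
--         elif R[j] <= L[i] + 1:
--             matched += 1
--             i += 1
--             j += 1
--         else:
--             i += 1
--     return n - len(L) + matched
-- ===== Notes on version B (the rewrite author's own statement) =====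
-- stated objective: alternative
-- what changed: A repeatedly tests and removes student-1/student+1 in a mutable reserve set while iterating the sorted lost set; B sorts the lost-only and reserve-only lists once and counts matches with a single two-pointer merge, maintaining no mutable set at all.
import Mathlib
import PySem

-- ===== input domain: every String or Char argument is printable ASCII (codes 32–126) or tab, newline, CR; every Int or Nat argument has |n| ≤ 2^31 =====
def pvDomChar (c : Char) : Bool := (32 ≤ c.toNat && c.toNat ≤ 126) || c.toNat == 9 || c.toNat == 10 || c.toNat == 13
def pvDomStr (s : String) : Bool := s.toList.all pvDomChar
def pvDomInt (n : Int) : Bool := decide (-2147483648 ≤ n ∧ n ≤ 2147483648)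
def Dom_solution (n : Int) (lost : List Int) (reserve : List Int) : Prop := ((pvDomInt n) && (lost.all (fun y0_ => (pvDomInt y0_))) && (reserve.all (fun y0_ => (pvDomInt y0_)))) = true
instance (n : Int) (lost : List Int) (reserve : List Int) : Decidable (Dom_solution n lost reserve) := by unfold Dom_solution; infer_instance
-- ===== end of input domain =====

-- B replaces A's set-membership greedy with a two-pointer merge over the sorted
-- lost-only and reserve-only lists (objective: alternative; no speed claim).

-- ===== PORT A =====
def solution (n : Int) (lost : List Int) (reserve : List Int) : Int :=
  let lost_set : PySem.Set Int := PySem.Set.ofList lost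
  let reserve_set : PySem.Set Int := PySem.Set.ofList reserve
  let intersection := PySem.Set.inter lost_set reserve_set
  let lost_set := PySem.Set.diff lost_set intersection
  let reserve_set := PySem.Set.diff reserve_set intersection
  let st :=
    (PySem.List.sorted lost_set (fun x => x) false).foldl
      (fun (st : PySem.Set Int × Int) student =>
        if PySem.Set.contains st.1 (student - 1) then
          ((PySem.Set.remove? st.1 (student - 1)).getD st.1, st.2 + 1)
        else if PySem.Set.contains st.1 (student + 1) then
          ((PySem.Set.remove? st.1 (student + 1)).getD st.1, st.2 + 1)
        else st)
      (reserve_set, 0)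
  n - PySem.Set.len lost_set + st.2

-- ===== PORT B =====
-- the while loop of Source B, as recursion on the two sorted lists (i/j pointers = consumed prefixes)
def pvMatch2 : List Int → List Int → Int
  | [], _ => 0
  | _ :: _, [] => 0
  | l :: ls, r :: rs =>
    if r < l - 1 then pvMatch2 (l :: ls) rs
    else if r ≤ l + 1 then pvMatch2 ls rs + 1
    else pvMatch2 ls (r :: rs)
termination_by xs ys => xs.length + ys.length

def solution_alt (n : Int) (lost : List Int) (reserve : List Int) : Int :=
  let L := PySem.List.sorted (PySem.Set.diff (PySem.Set.ofList lost) (PySem.Set.ofList reserve)) (fun x => x) false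
  let R := PySem.List.sorted (PySem.Set.diff (PySem.Set.ofList reserve) (PySem.Set.ofList lost)) (fun x => x) false
  n - (L.length : Int) + pvMatch2 L R

-- ===== PRECONDITION & SPEC =====
def Spec_solution (n : Int) (lost : List Int) (reserve : List Int) (out : Int) : Prop := out = solution_alt n lost reserve
instance (n : Int) (lost : List Int) (reserve : List Int) (out : Int) : Decidable (Spec_solution n lost reserve out) := by unfold Spec_solution; infer_instance

-- ===== CLAIM (what is proved, stated in full; the proofs are below) =====
def Claim_equal_solution : Prop := ∀ (n : Int) (lost : List Int) (reserve : List Int), Dom_solution n lost reserve → Spec_solution n lost reserve (solution n lost reserve)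

-- ===== LEMMAS AND PROOFS =====

-- A's loop, reduced to the count it adds (the threaded reserve set made explicit)
def pvGreedy : List Int → List Int → Int
  | [], _ => 0
  | s :: ls, S =>
    if (s - 1) ∈ S then pvGreedy ls (PySem.Set.discard S (s - 1)) + 1
    else if (s + 1) ∈ S then pvGreedy ls (PySem.Set.discard S (s + 1)) + 1
    else pvGreedy ls S

theorem pvGreedy_nil (L : List Int) : pvGreedy L [] = 0 := by
  induction L with
  | nil => rfl
  | cons s ls ih => simp [pvGreedy, ih]

theorem pvFold_eq_greedy (L : List Int) (S : List Int) (a : Int) :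
    (L.foldl
      (fun (st : PySem.Set Int × Int) student =>
        if PySem.Set.contains st.1 (student - 1) then
          ((PySem.Set.remove? st.1 (student - 1)).getD st.1, st.2 + 1)
        else if PySem.Set.contains st.1 (student + 1) then
          ((PySem.Set.remove? st.1 (student + 1)).getD st.1, st.2 + 1)
        else st)
      (S, a)).2 = a + pvGreedy L S := by
  induction L generalizing S a with
  | nil => simp [pvGreedy]
  | cons s ls ih =>
    rw [List.foldl_cons]
    by_cases h1 : (s - 1) ∈ S
    · rw [if_pos ((PySem.Set.contains_iff _ _).mpr h1), PySem.Set.remove?_of_mem h1]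
      simp only [Option.getD_some, pvGreedy, if_pos h1]
      rw [ih]; omega
    · rw [if_neg (by simp only [PySem.Set.contains_iff]; exact h1)]
      by_cases h2 : (s + 1) ∈ S
      · rw [if_pos ((PySem.Set.contains_iff _ _).mpr h2), PySem.Set.remove?_of_mem h2]
        simp only [Option.getD_some, pvGreedy, if_neg h1, if_pos h2]
        rw [ih]; omega
      · rw [if_neg (by simp only [PySem.Set.contains_iff]; exact h2)]
        simp only [pvGreedy, if_neg h1, if_neg h2]
        exact ih S a

theorem pvGreedy_perm (L : List Int) (S S' : List Int) (hp : S.Perm S') :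
    pvGreedy L S = pvGreedy L S' := by
  induction L generalizing S S' with
  | nil => rfl
  | cons s ls ih =>
    simp only [pvGreedy, hp.mem_iff]
    split_ifs with h1 h2
    · exact congrArg (· + 1) (ih _ _ (hp.filter _))
    · exact congrArg (· + 1) (ih _ _ (hp.filter _))
    · exact ih _ _ hp

-- an element smaller than every student-1 is never touched by A's greedy loop
theorem pvGreedy_drop (L : List Int) (r : Int) (rs : List Int)
    (h : ∀ s ∈ L, r < s - 1) :
    pvGreedy L (r :: rs) = pvGreedy L rs := by
  induction L generalizing rs with
  | nil => rfl
  | cons s ls ih =>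
    have hr := h s (by simp)
    have hne1 : r ≠ s - 1 := by omega
    have hne2 : r ≠ s + 1 := by omega
    have h' : ∀ s' ∈ ls, r < s' - 1 := fun s' hs' => h s' (by simp [hs'])
    have e1 : PySem.Set.discard (r :: rs) (s - 1) = r :: PySem.Set.discard rs (s - 1) := by
      simp [PySem.Set.discard, hne1]
    have e2 : PySem.Set.discard (r :: rs) (s + 1) = r :: PySem.Set.discard rs (s + 1) := by
      simp [PySem.Set.discard, hne2]
    simp only [pvGreedy, List.mem_cons, Ne.symm hne1, Ne.symm hne2, false_or, e1, e2]
    split_ifs with h1 h2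
    · rw [ih _ h']
    · rw [ih _ h']
    · exact ih _ h'

theorem pvGreedy_eq_match2 (L R : List Int)
    (hL : L.Pairwise (· < ·)) (hR : R.Pairwise (· < ·))
    (hd : ∀ x ∈ L, x ∉ R) :
    pvGreedy L R = pvMatch2 L R := by
  fun_induction pvMatch2 L R with
  | case1 R => rfl
  | case2 l ls => exact pvGreedy_nil _
  | case3 l ls r rs hlt ih =>
    rw [pvGreedy_drop (l :: ls) r rs ?_]
    · exact ih hL (List.Pairwise.of_cons hR)
        (fun x hx hmem => hd x hx (by simp [hmem]))
    · intro s hs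
      rcases List.mem_cons.mp hs with h | h
      · omega
      · have := (List.pairwise_cons.mp hL).1 s h; omega
  | case4 l ls r rs hlt hle ih =>
    have hlr : l ≠ r := fun h => hd l (by simp) (by simp [h])
    have hrge : ∀ y ∈ rs, r < y := (List.pairwise_cons.mp hR).1
    have e0 : PySem.Set.discard (r :: rs) r = PySem.Set.discard rs r := by
      simp [PySem.Set.discard]
    have ers : PySem.Set.discard rs r = rs := by
      rw [PySem.Set.discard]
      apply List.filter_eq_self.mpr
      intro y hy
      have := hrge y hy
      simp; omega
    rcases (by omega : r = l - 1 ∨ r = l + 1) with h | h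
    · subst h
      simp only [pvGreedy]
      rw [if_pos (show l - 1 ∈ (l - 1) :: rs by simp), e0, ers,
        ih (List.Pairwise.of_cons hL) (List.Pairwise.of_cons hR)
          (fun x hx hm => hd x (by simp [hx]) (by simp [hm]))]
    · subst h
      have hn1 : l - 1 ∉ (l + 1) :: rs := by
        simp only [List.mem_cons]
        rintro (h | h)
        · omega
        · have := hrge _ h; omega
      simp only [pvGreedy]
      rw [if_neg hn1, if_pos (show l + 1 ∈ (l + 1) :: rs by simp), e0, ers,
        ih (List.Pairwise.of_cons hL) (List.Pairwise.of_cons hR)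
          (fun x hx hm => hd x (by simp [hx]) (by simp [hm]))]
  | case5 l ls r rs hlt hle ih =>
    have hrge : ∀ y ∈ rs, r < y := (List.pairwise_cons.mp hR).1
    have hn1 : l - 1 ∉ r :: rs := by
      simp only [List.mem_cons]
      rintro (h | h)
      · omega
      · have := hrge _ h; omega
    have hn2 : l + 1 ∉ r :: rs := by
      simp only [List.mem_cons]
      rintro (h | h)
      · omega
      · have := hrge _ h; omega
    simp only [pvGreedy, if_neg hn1, if_neg hn2]
    exact ih (List.Pairwise.of_cons hL) hR (fun x hx hm => hd x (by simp [hx]) hm)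

-- A's 'lost_set - intersection' is, as a list, 'set(lost) - set(reserve)' (and symmetrically)
theorem pvDiff_inter_left (s t : List Int) :
    PySem.Set.diff s (PySem.Set.inter s t) = PySem.Set.diff s t := by
  rw [PySem.Set.diff, PySem.Set.diff]
  apply List.filter_congr
  intro x hx
  congr 1
  cases hc : PySem.Set.contains t x with
  | true =>
    exact (PySem.Set.contains_iff _ x).mpr
      ((PySem.Set.mem_inter s t x).mpr ⟨hx, (PySem.Set.contains_iff t x).mp hc⟩)
  | false =>
    rw [Bool.eq_false_iff]
    intro hT
    have := ((PySem.Set.mem_inter s t x).mp ((PySem.Set.contains_iff _ x).mp hT)).2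
    rw [(PySem.Set.contains_iff t x).mpr this] at hc
    exact Bool.noConfusion hc

theorem pvDiff_inter_right (s t : List Int) :
    PySem.Set.diff t (PySem.Set.inter s t) = PySem.Set.diff t s := by
  rw [PySem.Set.diff, PySem.Set.diff]
  apply List.filter_congr
  intro x hx
  congr 1
  cases hc : PySem.Set.contains s x with
  | true =>
    exact (PySem.Set.contains_iff _ x).mpr
      ((PySem.Set.mem_inter s t x).mpr ⟨(PySem.Set.contains_iff s x).mp hc, hx⟩)
  | false =>
    rw [Bool.eq_false_iff]
    intro hT
    have := ((PySem.Set.mem_inter s t x).mp ((PySem.Set.contains_iff _ x).mp hT)).1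
    rw [(PySem.Set.contains_iff s x).mpr this] at hc
    exact Bool.noConfusion hc

theorem pvPairwise_lt_of_le_nodup (l : List Int)
    (h1 : l.Pairwise (· ≤ ·)) (h2 : l.Nodup) : l.Pairwise (· < ·) := by
  induction l with
  | nil => exact List.Pairwise.nil
  | cons a t ih =>
    rw [List.pairwise_cons] at h1 ⊢
    rw [List.nodup_cons] at h2
    refine ⟨fun b hb => lt_of_le_of_ne (h1.1 b hb) ?_, ih h1.2 h2.2⟩
    intro he; exact h2.1 (he ▸ hb)

theorem pvSorted_diff_lt (xs ys : List Int) :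
    (PySem.List.sorted (PySem.Set.diff (PySem.Set.ofList xs) (PySem.Set.ofList ys)) (fun x => x) false).Pairwise (· < ·) := by
  apply pvPairwise_lt_of_le_nodup
  · exact PySem.List.sorted_pairwise _ _
  · exact (PySem.List.sorted_perm _ _ _).symm.nodup
      (PySem.Set.nodup_diff _ _ (PySem.Set.nodup_ofList xs))

-- ===== VERDICT (by name: the statement is the Claim_ definition above) =====
theorem solution_spec : Claim_equal_solution := by
  intro n lost reserve _
  unfold Spec_solution
  have hA : solution n lost reserve =
      n - PySem.Set.len (PySem.Set.diff (PySem.Set.ofList lost) (PySem.Set.inter (PySem.Set.ofList lost) (PySem.Set.ofList reserve)))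
        + ((PySem.List.sorted (PySem.Set.diff (PySem.Set.ofList lost) (PySem.Set.inter (PySem.Set.ofList lost) (PySem.Set.ofList reserve))) (fun x => x) false).foldl
            (fun (st : PySem.Set Int × Int) student =>
              if PySem.Set.contains st.1 (student - 1) then
                ((PySem.Set.remove? st.1 (student - 1)).getD st.1, st.2 + 1)
              else if PySem.Set.contains st.1 (student + 1) then
                ((PySem.Set.remove? st.1 (student + 1)).getD st.1, st.2 + 1)
              else st)
            (PySem.Set.diff (PySem.Set.ofList reserve) (PySem.Set.inter (PySem.Set.ofList lost) (PySem.Set.ofList reserve)), 0)).2 := rfl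
  rw [hA, pvDiff_inter_left, pvDiff_inter_right, pvFold_eq_greedy]
  set L := PySem.List.sorted (PySem.Set.diff (PySem.Set.ofList lost) (PySem.Set.ofList reserve)) (fun x => x) false with hLdef
  set R := PySem.List.sorted (PySem.Set.diff (PySem.Set.ofList reserve) (PySem.Set.ofList lost)) (fun x => x) false with hRdef
  have hperm : (PySem.Set.diff (PySem.Set.ofList reserve) (PySem.Set.ofList lost)).Perm R :=
    (PySem.List.sorted_perm _ _ _).symm
  rw [pvGreedy_perm L _ R hperm]
  rw [pvGreedy_eq_match2 L R (pvSorted_diff_lt lost reserve) (pvSorted_diff_lt reserve lost) ?hd]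
  case hd =>
    intro x hxL hxR
    have hx1 := (PySem.List.sorted_perm _ _ _).mem_iff.mp (hLdef ▸ hxL)
    have hx2 := (PySem.List.sorted_perm _ _ _).mem_iff.mp (hRdef ▸ hxR)
    exact ((PySem.Set.mem_diff _ _ x).mp hx1).2 ((PySem.Set.mem_diff _ _ x).mp hx2).1
  have hlen : PySem.Set.len (PySem.Set.diff (PySem.Set.ofList lost) (PySem.Set.ofList reserve)) = (L.length : Int) := by
    rw [PySem.Set.len, (PySem.List.sorted_perm _ _ _).length_eq]
  rw [hlen, zero_add]
  rfl
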